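-- pv_equiv track=rewrite | github.com/nocoolsandwich/26up-case | skills/stock-wave-attribution/scripts/orchestrator.py | _format_news_source_distribution
-- ===== SOURCE A (Python) =====
-- from typing import Any, Callable
--
-- def _format_news_source_distribution(rows: list[dict[str, Any]]) -> str:
--     counts: dict[str, int] = {}
--     for row in rows:
--         source_id = str(row.get("source_id", "")).strip()
--         if not source_id:
--             continue
--         counts[source_id] = counts.get(source_id, 0) + 1
--     ordered = sorted(counts.items(), key=lambda item: (-item[1], item[0]))
--     return " / ".join(f"{source}({count}条)" for source, count in ordered)
-- ===== SOURCE B (Python) =====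
-- def _format_news_source_distribution(rows):
--     # sort-then-group counting: normalize & filter ids, sort them, run-length
--     # encode the sorted list, then order by (-count, source) and join.
--     ids = sorted(s for row in rows for s in (str(row.get("source_id", "")).strip(),) if s)
--     pairs = []
--     i = 0
--     while i < len(ids):
--         j = i + 1
--         while j < len(ids) and ids[j] == ids[i]:
--             j += 1
--         pairs.append((ids[i], j - i))
--         i = j
--     ordered = sorted(pairs, key=lambda p: (-p[1], p[0]))
--     return " / ".join(f"{source}({count}条)" for source, count in ordered)
-- ===== Notes on version B (the rewrite author's own statement) =====
-- stated objective: alternative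
-- what changed: Replaces A's dict-based counting with sort-then-group counting: B sorts the stripped non-empty source_ids, run-length encodes the sorted list into (source, count) pairs with index loops, then sorts the pairs by (-count, source) and joins.
import Mathlib
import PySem

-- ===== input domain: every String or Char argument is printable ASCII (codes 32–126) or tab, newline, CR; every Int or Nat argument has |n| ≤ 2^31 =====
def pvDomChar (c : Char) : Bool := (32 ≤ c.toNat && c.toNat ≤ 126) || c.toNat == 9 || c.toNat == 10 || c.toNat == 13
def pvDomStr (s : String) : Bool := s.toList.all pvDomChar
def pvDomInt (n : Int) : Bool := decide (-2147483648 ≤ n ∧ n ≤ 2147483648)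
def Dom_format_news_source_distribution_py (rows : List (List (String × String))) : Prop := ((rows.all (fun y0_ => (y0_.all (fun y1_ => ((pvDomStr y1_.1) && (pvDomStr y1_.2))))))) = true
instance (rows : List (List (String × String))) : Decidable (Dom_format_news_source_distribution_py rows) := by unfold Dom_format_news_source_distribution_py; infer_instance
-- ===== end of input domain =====

-- B replaces A's dict-based counting by sort-then-run-length-encode counting (alternative
-- decomposition, similar cost). Values of the rows are Strings here, so Python's str(...) is
-- the identity and is not ported explicitly.

-- ===== PORT A =====
def format_news_source_distribution_py (rows : List (List (String × String))) : String :=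
  let counts := rows.foldl (fun (d : PySem.Dict String Int) row =>
      let source_id := PySem.Str.strip ((PySem.Dict.mk row).getD "source_id" "")
      if source_id = "" then d
      else d.insert source_id (d.getD source_id 0 + 1)) PySem.Dict.empty
  let ordered := PySem.List.sorted2 counts.items (fun item => -item.2) (fun item => item.1)
  PySem.Str.join " / " (ordered.map (fun p => p.1 ++ "(" ++ PySem.Int.toStr p.2 ++ "条)"))

-- ===== PORT B =====
-- inner while loop of Source B: count the leading run of s, return (run length, rest)
def pvCountRun (s : String) : List String → Nat × List String
  | [] => (0, [])
  | x :: xs => if x = s then ((pvCountRun s xs).1 + 1, (pvCountRun s xs).2) else (0, x :: xs)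

-- needed by pvRuns' termination proof
lemma pvCountRun_len (s : String) (l : List String) : (pvCountRun s l).2.length ≤ l.length := by
  induction l with
  | nil => simp [pvCountRun]
  | cons x xs ih => by_cases h : x = s <;> simp [pvCountRun, h] <;> omega

-- outer while loop of Source B: run-length encode
def pvRuns : List String → List (String × Int)
  | [] => []
  | x :: xs => (x, ((pvCountRun x xs).1 : Int) + 1) :: pvRuns (pvCountRun x xs).2
  termination_by l => l.length
  decreasing_by simpa using Nat.lt_succ_of_le (pvCountRun_len x xs)

def format_news_source_distribution_py_alt (rows : List (List (String × String))) : String :=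
  let ids := PySem.List.sorted
      ((rows.map (fun row => PySem.Str.strip ((PySem.Dict.mk row).getD "source_id" ""))).filter
        (fun s => decide (¬ s = ""))) (fun s => s)
  let ordered := PySem.List.sorted2 (pvRuns ids) (fun p => -p.2) (fun p => p.1)
  PySem.Str.join " / " (ordered.map (fun p => p.1 ++ "(" ++ PySem.Int.toStr p.2 ++ "条)"))

-- ===== PRECONDITION & SPEC =====
def Spec_format_news_source_distribution_py (rows : List (List (String × String))) (out : String) : Prop := out = format_news_source_distribution_py_alt rows
instance (rows : List (List (String × String))) (out : String) : Decidable (Spec_format_news_source_distribution_py rows out) := by unfold Spec_format_news_source_distribution_py; infer_instance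

-- ===== CLAIM (what is proved, stated in full; the proofs are below) =====
def Claim_equal_format_news_source_distribution_py : Prop := ∀ (rows : List (List (String × String))), Dom_format_news_source_distribution_py rows → Spec_format_news_source_distribution_py rows (format_news_source_distribution_py rows)

-- ===== LEMMAS AND PROOFS =====

-- Python's tuple key (-count, source) is the lexicographic product order
lemma pv_sorted2_eq_sorted_lex {α : Type} (xs : List α) (k1 : α → Int) (k2 : α → String) :
    PySem.List.sorted2 xs k1 k2 = PySem.List.sorted xs (fun a => toLex (k1 a, k2 a)) := by
  unfold PySem.List.sorted2 PySem.List.sorted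
  beta_reduce
  simp only [Bool.false_eq_true, if_false]
  congr 1
  funext acc x
  congr 1
  funext a b
  apply Bool.eq_iff_iff.mpr
  simp only [Bool.or_eq_true, Bool.and_eq_true, Bool.not_eq_true', decide_eq_true_eq,
    decide_eq_false_iff_not, Prod.Lex.lt_iff, ofLex_toLex]
  rcases lt_trichotomy (k1 a) (k1 b) with h | h | h
  · simp [h, h.ne, not_lt_of_gt h]
  · simp [h, lt_irrefl]
  · simp [not_lt_of_gt h, h, Ne.symm (ne_of_lt h)]

lemma pvCountRun_append (s : String) (l : List String) :
    l = List.replicate (pvCountRun s l).1 s ++ (pvCountRun s l).2 := by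
  induction l with
  | nil => simp [pvCountRun]
  | cons x xs ih =>
    by_cases h : x = s
    · subst h; simpa [pvCountRun, List.replicate_succ] using ih
    · simp [pvCountRun, h]

lemma pvCountRun_not_mem (x : String) (xs : List String)
    (h : (x :: xs).Pairwise (· ≤ ·)) : x ∉ (pvCountRun x xs).2 := by
  induction xs with
  | nil => simp [pvCountRun]
  | cons y ys ih =>
    by_cases hy : y = x
    · subst hy
      have hsub : (y :: ys).Sublist (y :: y :: ys) := by simp
      exact (by simpa [pvCountRun] using ih (h.sublist hsub))
    · simp only [pvCountRun, if_neg hy]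
      intro hmem
      rcases List.mem_cons.mp hmem with h' | hxmem
      · exact hy h'.symm
      · rcases List.pairwise_cons.mp h with ⟨h1, h2⟩
        rcases List.pairwise_cons.mp h2 with ⟨h3, _⟩
        exact hy (le_antisymm (h3 x hxmem) (h1 y (by simp)))

lemma pvRuns_mem (l : List String) :
    l.Pairwise (· ≤ ·) → ∀ (k : String) (c : Int),
      ((k, c) ∈ pvRuns l ↔ (k ∈ l ∧ c = (l.count k : Int))) := by
  induction l using pvRuns.induct with
  | case1 => simp [pvRuns]
  | case2 x xs ih =>
    intro h k c
    have happ := pvCountRun_append x xs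
    have hnm := pvCountRun_not_mem x xs h
    have hrest : (pvCountRun x xs).2.Pairwise (· ≤ ·) := by
      have : (pvCountRun x xs).2.Sublist (x :: xs) := by
        refine List.Sublist.trans ?_ (List.sublist_cons_self x xs)
        conv => rhs; rw [happ]
        exact List.sublist_append_right _ _
      exact h.sublist this
    rw [pvRuns]
    by_cases hk : k = x
    · subst hk
      have hcnt : (k :: xs).count k = (pvCountRun k xs).1 + 1 := by
        conv => lhs; rw [show k :: xs = k :: (List.replicate (pvCountRun k xs).1 k ++ (pvCountRun k xs).2) from by rw [← happ]]
        simp [List.count_append, List.count_replicate,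
          List.count_eq_zero.mpr hnm, Nat.add_comm]
      have hpair : ((pvCountRun k xs).1 : Int) + 1 = (((k :: xs).count k : Nat) : Int) := by
        rw [hcnt]; push_cast; ring
      constructor
      · intro hm
        rcases List.mem_cons.mp hm with heq | hm'
        · cases heq
          exact ⟨List.mem_cons_self, hpair⟩
        · exact absurd ((ih hrest k c).mp hm').1 hnm
      · rintro ⟨-, rfl⟩
        exact List.mem_cons.mpr (Or.inl (by rw [← hpair]))
    · have hk' : ¬ x = k := fun e => hk e.symm
      have hmemr : k ∈ (pvCountRun x xs).2 ↔ k ∈ x :: xs := by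
        conv => rhs; rw [show x :: xs = x :: (List.replicate (pvCountRun x xs).1 x ++ (pvCountRun x xs).2) from by rw [← happ]]
        simp [List.mem_append, List.mem_replicate, hk]
      have hcnt : (x :: xs).count k = (pvCountRun x xs).2.count k := by
        conv => lhs; rw [show x :: xs = x :: (List.replicate (pvCountRun x xs).1 x ++ (pvCountRun x xs).2) from by rw [← happ]]
        simp [List.count_append, List.count_replicate, hk, hk']
      simp only [List.mem_cons, Prod.mk.injEq, ih hrest, hmemr, hcnt]
      tauto

lemma pvRuns_keys_nodup (l : List String) (h : l.Pairwise (· ≤ ·)) :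
    ((pvRuns l).map Prod.fst).Nodup := by
  induction l using pvRuns.induct with
  | case1 => simp [pvRuns]
  | case2 x xs ih =>
    have happ := pvCountRun_append x xs
    have hnm := pvCountRun_not_mem x xs h
    have hrest : (pvCountRun x xs).2.Pairwise (· ≤ ·) := by
      have : (pvCountRun x xs).2.Sublist (x :: xs) := by
        refine List.Sublist.trans ?_ (List.sublist_cons_self x xs)
        conv => rhs; rw [happ]
        exact List.sublist_append_right _ _
      exact h.sublist this
    rw [pvRuns]
    simp only [List.map_cons, List.nodup_cons]
    refine ⟨?_, ih hrest⟩
    intro hx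
    rcases List.mem_map.mp hx with ⟨⟨k, c⟩, hmem, hfst⟩
    cases hfst
    exact hnm ((pvRuns_mem _ hrest _ _).mp hmem).1

-- the tuple key is injective on pairs
lemma pv_key_injective : Function.Injective (fun p : String × Int => toLex (-p.2, p.1)) := by
  rintro ⟨s, c⟩ ⟨t, d⟩ h
  have := congrArg ofLex h
  simp only [ofLex_toLex, Prod.mk.injEq] at this
  exact Prod.ext this.2 (by omega)

-- A's counting loop is Counter(ids) for the filtered, normalized ids
lemma pv_counts_eq (g : List (String × String) → String) (rows : List (List (String × String))) :
    rows.foldl (fun (d : PySem.Dict String Int) row =>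
        if g row = "" then d else d.insert (g row) (d.getD (g row) 0 + 1)) PySem.Dict.empty
      = PySem.Dict.counter ((rows.map g).filter (fun s => decide (¬ s = ""))) := by
  rw [← List.foldl_map (f := g)
    (g := fun (d : PySem.Dict String Int) s => if s = "" then d else d.insert s (d.getD s 0 + 1))]
  have hswap : ∀ (d : PySem.Dict String Int) (s : String),
      (if s = "" then d else d.insert s (d.getD s 0 + 1))
        = (if ¬ s = "" then d.insert s (d.getD s 0 + 1) else d) := by
    intro d s; rw [ite_not]
  simp only [hswap]
  rw [PySem.List.foldl_ite_eq_foldl_filter (fun s => ¬ s = "")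
    (fun (d : PySem.Dict String Int) s => d.insert s (d.getD s 0 + 1))]
  rw [PySem.Dict.foldl_insert_getD_add_one_eq_counter]

-- B's run-length pairs of the sorted ids are a permutation of Counter(ids).items
lemma pv_runs_perm (ids : List String) :
    (pvRuns (PySem.List.sorted ids (fun s => s))).Perm
      ((PySem.Set.ofList ids).map (fun k => (k, (ids.count k : Int)))) := by
  have hsort : (PySem.List.sorted ids (fun s => s)).Pairwise (· ≤ ·) :=
    PySem.List.sorted_pairwise ids (fun s => s)
  have hperm' : (PySem.List.sorted ids (fun s => s)).Perm ids :=
    PySem.List.sorted_perm ids (fun s => s) false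
  rw [List.perm_ext_iff_of_nodup
    ((pvRuns_keys_nodup _ hsort).of_map Prod.fst)
    ((PySem.Set.nodup_ofList ids).map (fun a b hab => by simpa using congrArg Prod.fst hab))]
  rintro ⟨k, c⟩
  rw [pvRuns_mem _ hsort k c]
  constructor
  · rintro ⟨hmem, rfl⟩
    refine List.mem_map.mpr ⟨k, (PySem.Set.mem_ofList ids k).mpr (hperm'.mem_iff.mp hmem), ?_⟩
    rw [hperm'.count_eq]
  · intro hmem
    rcases List.mem_map.mp hmem with ⟨k', hk', heq⟩
    simp only [Prod.mk.injEq] at heq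
    obtain ⟨rfl, rfl⟩ := heq
    exact ⟨hperm'.mem_iff.mpr ((PySem.Set.mem_ofList ids _).mp hk'), by rw [hperm'.count_eq]⟩

-- ===== VERDICT (by name: the statement is the Claim_ definition above) =====
theorem format_news_source_distribution_py_spec : Claim_equal_format_news_source_distribution_py := by
  intro rows _
  unfold Spec_format_news_source_distribution_py
  unfold format_news_source_distribution_py format_news_source_distribution_py_alt
  simp only []
  rw [pv_counts_eq, PySem.Dict.items_counter]
  rw [pv_sorted2_eq_sorted_lex, pv_sorted2_eq_sorted_lex]
  rw [PySem.List.sorted_eq_sorted_of_perm _ _ _ pv_key_injective (pv_runs_perm _)]
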